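-- pv_equiv track=rewrite | github.com/ivgnk/Pyton-Codewars-Leetcode | Leetcode/subarray_0413_medi_Arithmetic Slices.py | numberOfArithmeticSlices4
-- ===== SOURCE A (Python) =====
-- def numberOfArithmeticSlices4(nums):
--     """
--     :type nums: List[int]
--     :rtype: int
--     """
--     ll=len(nums); ll1=ll+1
--     if ll<3: return 0
--     n=0
--     for i in range(ll-2):
--         for j in range(i+3,ll1):
--             s=nums[i:j]
--             d=s[1]-s[0]
--             if all((s[i]-s[i-1])==d for i in range(1,len(s))):
--                 n+=1
--     return n
-- ===== SOURCE B (Python) =====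
-- def numberOfArithmeticSlices4(nums):
--     """
--     :type nums: List[int]
--     :rtype: int
--     """
--     total = 0
--     cnt = 0
--     for a, b, c in zip(nums, nums[1:], nums[2:]):
--         if c - b == b - a:
--             cnt += 1
--             total += cnt
--         else:
--             cnt = 0
--     return total
-- ===== Notes on version B (the rewrite author's own statement) =====
-- stated objective: faster
-- what changed: Replaced the enumerate-every-slice-and-rescan-it triple loop by a single linear pass that tracks the current run length of equal consecutive differences and accumulates it.
import Mathlib
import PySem

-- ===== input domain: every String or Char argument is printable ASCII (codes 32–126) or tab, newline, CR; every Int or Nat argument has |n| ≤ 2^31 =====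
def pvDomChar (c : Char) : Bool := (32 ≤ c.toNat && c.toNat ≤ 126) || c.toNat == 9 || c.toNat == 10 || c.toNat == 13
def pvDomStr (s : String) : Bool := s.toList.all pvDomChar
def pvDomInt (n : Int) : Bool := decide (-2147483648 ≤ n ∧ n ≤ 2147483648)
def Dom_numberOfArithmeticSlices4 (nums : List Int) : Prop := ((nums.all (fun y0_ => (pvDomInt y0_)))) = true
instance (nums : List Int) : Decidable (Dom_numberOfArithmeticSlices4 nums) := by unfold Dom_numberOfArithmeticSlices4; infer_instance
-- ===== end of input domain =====

-- B replaces A's enumerate-every-slice-and-rescan triple loop by a single linear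
-- pass tracking the run length of equal consecutive differences (objective: faster).

-- ===== PORT A =====
def numberOfArithmeticSlices4 (nums : List Int) : Int :=
  let ll : Int := nums.length
  let ll1 : Int := ll + 1
  if ll < 3 then 0 else
    (PySem.List.pyRange 0 (ll - 2) 1).foldl (fun n i =>
      (PySem.List.pyRange (i + 3) ll1 1).foldl (fun n j =>
        let s := PySem.List.slice nums (some i) (some j)
        let d := PySem.List.pyGetD s 1 0 - PySem.List.pyGetD s 0 0
        if (PySem.List.pyRange 1 (s.length : Int) 1).all
             (fun k => PySem.List.pyGetD s k 0 - PySem.List.pyGetD s (k - 1) 0 == d)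
        then n + 1 else n) n) 0

-- ===== PORT B =====
-- Source B's 'for a, b, c in zip(nums, nums[1:], nums[2:])' loop: structural
-- recursion over the consecutive triples, with accumulators cnt and total
def altGo : Int → Int → List Int → Int → Int → Int
  | _, _, [], _, total => total
  | a, b, c :: t, cnt, total =>
    if c - b == b - a then altGo b c t (cnt + 1) (total + (cnt + 1))
    else altGo b c t 0 total

def numberOfArithmeticSlices4_alt (nums : List Int) : Int :=
  match nums with
  | a :: b :: rest => altGo a b rest 0 0
  | _ => 0

-- ===== PRECONDITION & SPEC =====
def Spec_numberOfArithmeticSlices4 (nums : List Int) (out : Int) : Prop := out = numberOfArithmeticSlices4_alt nums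
instance (nums : List Int) (out : Int) : Decidable (Spec_numberOfArithmeticSlices4 nums out) := by unfold Spec_numberOfArithmeticSlices4; infer_instance

-- ===== CLAIM (what is proved, stated in full; the proofs are below) =====
def Claim_equal_numberOfArithmeticSlices4 : Prop := ∀ (nums : List Int), Dom_numberOfArithmeticSlices4 nums → Spec_numberOfArithmeticSlices4 nums (numberOfArithmeticSlices4 nums)

-- ===== LEMMAS AND PROOFS =====

-- 'every consecutive difference of p :: l equals d', structurally
def diffsOk (d : Int) : Int → List Int → Bool
  | _, [] => true
  | p, c :: t => (c - p == d) && diffsOk d c t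

-- number of nonempty prefixes of l that extend a :: b :: · arithmetically
def run : Int → Int → List Int → Int
  | _, _, [] => 0
  | a, b, c :: t => if c - b == b - a then 1 + run b c t else 0

-- total count of arithmetic subarrays of length ≥ 3, grouped by start position
def T : List Int → Int
  | a :: b :: l => run a b l + T (b :: l)
  | _ => 0

-- port A's per-slice test, as a function of the slice
def chkA (s : List Int) : Bool :=
  (PySem.List.pyRange 1 (s.length : Int) 1).all
    (fun k => PySem.List.pyGetD s k 0 - PySem.List.pyGetD s (k - 1) 0 ==
              PySem.List.pyGetD s 1 0 - PySem.List.pyGetD s 0 0)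

-- port A's inner loop, as a count of valid end positions
def innerCnt (nums : List Int) (i : Int) : Nat :=
  (PySem.List.pyRange (i + 3) ((nums.length : Int) + 1) 1).countP
    (fun j => chkA (PySem.List.slice nums (some i) (some j)))

lemma allRange_diffs (d : Int) :
    ∀ (t : List Int) (x : Int),
      ((List.range t.length).all
        (fun k => ((x :: t).getD (k + 1) 0 - (x :: t).getD k 0) == d)) = diffsOk d x t := by
  intro t
  induction t with
  | nil => intro x; rfl
  | cons y t ih =>
      intro x
      rw [List.length_cons, List.range_succ_eq_map, List.all_cons, List.all_map]
      simp only [List.getD_cons_succ, List.getD_cons_zero]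
      rw [diffsOk]
      refine congrArg (_ && ·) ?_
      rw [← ih y]
      rfl

lemma chkA_cons (x : Int) (t : List Int) (d : Int)
    (hd : PySem.List.pyGetD (x :: t) 1 0 - PySem.List.pyGetD (x :: t) 0 0 = d) :
    chkA (x :: t) = diffsOk d x t := by
  unfold chkA
  rw [hd]
  have hlen : (((x :: t).length : Int) - 1).toNat = t.length := by
    simp [List.length_cons]
  rw [PySem.List.pyRange_one, hlen, List.all_map]
  rw [← allRange_diffs d t x]
  congr 1
  funext k
  simp only [Function.comp_apply]
  have h1 : (1 : Int) + (k : Int) = ((k + 1 : Nat) : Int) := by push_cast; ring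
  rw [h1]
  have h2 : ((k + 1 : Nat) : Int) - 1 = ((k : Nat) : Int) := by push_cast; ring
  rw [h2]
  simp only [PySem.List.pyGetD_natCast]

lemma chkA_cons_cons (a b : Int) (t : List Int) :
    chkA (a :: b :: t) = diffsOk (b - a) b t := by
  rw [chkA_cons a (b :: t) (b - a) (by simp [PySem.List.pyGetD_ofNat'])]
  rw [diffsOk]
  simp

lemma countP_prefix_run :
    ∀ (rest : List Int) (a b : Int),
      (((List.range rest.length).countP
        (fun m => diffsOk (b - a) b (rest.take (m + 1)))) : Int) = run a b rest := by
  intro rest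
  induction rest with
  | nil => intro a b; simp [run]
  | cons c t ih =>
      intro a b
      rw [List.length_cons, List.range_succ_eq_map, List.countP_cons, List.countP_map]
      have hcomp : ((fun m => diffsOk (b - a) b ((c :: t).take (m + 1))) ∘ Nat.succ) =
          fun m => (c - b == b - a) && diffsOk (b - a) c (t.take (m + 1)) := by
        funext m; rfl
      have hzero : diffsOk (b - a) b ((c :: t).take (0 + 1)) = ((c - b == b - a) && true) := rfl
      rw [hcomp, hzero]
      by_cases h : c - b == b - a
      · have hc : c - b = b - a := by exact_mod_cast eq_of_beq h
        simp only [h, Bool.true_and, Bool.and_self, if_pos]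
        have ih' := ih b c
        rw [hc] at ih'
        rw [run, if_pos h, ← ih']
        push_cast
        ring
      · simp only [h, Bool.false_and]
        rw [run, if_neg h]
        simp

lemma innerCnt_zero (a b : Int) (rest : List Int) :
    (innerCnt (a :: b :: rest) 0 : Int) = run a b rest := by
  unfold innerCnt
  rw [PySem.List.pyRange_one]
  have hlen : (((a :: b :: rest).length : Int) + 1 - (0 + 3)).toNat = rest.length := by
    simp only [List.length_cons]
    omega
  rw [hlen, List.countP_map]
  have hfun : ((fun j => chkA (PySem.List.slice (a :: b :: rest) (some 0) (some j))) ∘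
        (fun k : Nat => (0 : Int) + 3 + (k : Int))) =
      (fun m : Nat => diffsOk (b - a) b (rest.take (m + 1))) := by
    funext m
    simp only [Function.comp_apply]
    have hcast : (0 : Int) + 3 + (m : Int) = ((m + 3 : Nat) : Int) := by push_cast; ring
    have hzero : (0 : Int) = ((0 : Nat) : Int) := rfl
    rw [hcast, hzero, PySem.List.slice_natCast]
    have hsl : ((a :: b :: rest).drop 0).take (m + 3 - 0) = a :: b :: rest.take (m + 1) := by
      simp [List.take_succ_cons]
    rw [hsl, chkA_cons_cons]
  rw [hfun, countP_prefix_run]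

lemma innerCnt_shift (x : Int) (l : List Int) (k : Nat) :
    innerCnt (x :: l) ((k : Int) + 1) = innerCnt l (k : Int) := by
  unfold innerCnt
  rw [PySem.List.pyRange_one, PySem.List.pyRange_one]
  have hlen : ((((x :: l).length : Int) + 1) - ((k : Int) + 1 + 3)).toNat =
      (((l.length : Int) + 1) - ((k : Int) + 3)).toNat := by
    simp [List.length_cons]; omega
  rw [hlen, List.countP_map, List.countP_map]
  congr 1
  funext m
  simp only [Function.comp_apply]
  have h1 : (k : Int) + 1 + 3 + (m : Int) = ((k + 4 + m : Nat) : Int) := by push_cast; ring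
  have h2 : (k : Int) + 3 + (m : Int) = ((k + 3 + m : Nat) : Int) := by push_cast; ring
  have h3 : (k : Int) + 1 = ((k + 1 : Nat) : Int) := by push_cast; ring
  rw [h1, h2, h3]
  have hs : PySem.List.slice (x :: l) (some ((k + 1 : Nat) : Int)) (some ((k + 4 + m : Nat) : Int)) =
      PySem.List.slice l (some ((k : Nat) : Int)) (some ((k + 3 + m : Nat) : Int)) := by
    rw [PySem.List.slice_natCast, PySem.List.slice_natCast]
    have h4 : k + 4 + m - (k + 1) = k + 3 + m - k := by omega
    rw [List.drop_succ_cons, h4]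
  rw [hs]

lemma A_sum (nums : List Int) (h : 3 ≤ nums.length) :
    numberOfArithmeticSlices4 nums =
      ((PySem.List.pyRange 0 ((nums.length : Int) - 2) 1).map
        (fun i => (innerCnt nums i : Int))).sum := by
  unfold numberOfArithmeticSlices4
  have hlt : ¬ ((nums.length : Int) < 3) := by exact_mod_cast not_lt.mpr h
  simp only [if_neg hlt]
  have hstep : ∀ (n i : Int),
      (PySem.List.pyRange (i + 3) ((nums.length : Int) + 1) 1).foldl (fun n j =>
        let s := PySem.List.slice nums (some i) (some j)
        let d := PySem.List.pyGetD s 1 0 - PySem.List.pyGetD s 0 0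
        if (PySem.List.pyRange 1 (s.length : Int) 1).all
             (fun k => PySem.List.pyGetD s k 0 - PySem.List.pyGetD s (k - 1) 0 == d)
        then n + 1 else n) n = n + (innerCnt nums i : Int) := by
    intro n i
    show (PySem.List.pyRange (i + 3) ((nums.length : Int) + 1) 1).foldl (fun n j =>
        if chkA (PySem.List.slice nums (some i) (some j)) then n + 1 else n) n = _
    rw [PySem.List.foldl_if_add_one]
    rfl
  calc _ = (PySem.List.pyRange 0 ((nums.length : Int) - 2) 1).foldl
          (fun n i => n + (innerCnt nums i : Int)) 0 := by
        apply PySem.List.foldl_congr_mem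
        intro acc x _
        exact hstep acc x
    _ = _ := by rw [PySem.List.foldl_add]; simp

lemma T_short (nums : List Int) (h : nums.length < 3) : T nums = 0 := by
  match nums, h with
  | [], _ => rfl
  | [_], _ => rfl
  | [a, b], _ => simp [T, run]

lemma A_eq_T : ∀ (nums : List Int), numberOfArithmeticSlices4 nums = T nums := by
  intro nums
  induction nums with
  | nil => rfl
  | cons x l ih =>
      by_cases hshort : (x :: l).length < 3
      · have hA : numberOfArithmeticSlices4 (x :: l) = 0 := by
          unfold numberOfArithmeticSlices4
          have : (((x :: l).length : Int)) < 3 := by exact_mod_cast hshort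
          simp only [if_pos this]
        rw [hA, T_short _ hshort]
      · have hshort := Nat.le_of_not_lt hshort
        obtain ⟨b, rest, rfl⟩ : ∃ b rest, l = b :: rest := by
          match l, hshort with
          | b :: rest, _ => exact ⟨b, rest, rfl⟩
        rw [A_sum _ hshort]
        have hpos : (0 : Int) < ((x :: b :: rest).length : Int) - 2 := by
          simp only [List.length_cons] at hshort ⊢
          push_cast
          omega
        rw [PySem.List.pyRange_one_cons hpos, List.map_cons, List.sum_cons, innerCnt_zero]
        show _ = run x b rest + T (b :: rest)
        congr 1
        rw [← ih]
        by_cases h2 : (b :: rest).length < 3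
        · have hr : rest.length = 1 := by
            simp only [List.length_cons] at h2 hshort
            omega
          have hlen : ((x :: b :: rest).length : Int) - 2 = 1 := by
            simp [List.length_cons, hr]
          rw [hlen]
          rw [PySem.List.pyRange_one_eq_nil (by omega : (1:Int) ≤ 0 + 1)]
          have hA : numberOfArithmeticSlices4 (b :: rest) = 0 := by
            unfold numberOfArithmeticSlices4
            have : (((b :: rest).length : Int)) < 3 := by exact_mod_cast h2
            simp only [if_pos this]
          rw [hA]
          rfl
        · have h2 := Nat.le_of_not_lt h2
          rw [A_sum _ h2]
          rw [PySem.List.pyRange_one, PySem.List.pyRange_one]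
          have hlen : (((x :: b :: rest).length : Int) - 2 - (0 + 1)).toNat =
              (((b :: rest).length : Int) - 2 - 0).toNat := by
            simp only [List.length_cons]
            omega
          rw [hlen, List.map_map, List.map_map]
          refine congrArg List.sum ?_
          apply List.map_congr_left
          intro k _
          simp only [Function.comp_apply]
          have h1 : (0 : Int) + 1 + (k : Int) = (k : Int) + 1 := by ring
          have h2' : (0 : Int) + (k : Int) = (k : Int) := by ring
          rw [h1, h2', innerCnt_shift]

lemma altGo_eq : ∀ (l : List Int) (a b cnt total : Int),
    altGo a b l cnt total = total + cnt * run a b l + T (a :: b :: l) := by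
  intro l
  induction l with
  | nil => intro a b cnt total; simp [altGo, run, T]
  | cons c t ih =>
      intro a b cnt total
      rw [altGo, run]
      have hT : T (a :: b :: c :: t) = run a b (c :: t) + T (b :: c :: t) := rfl
      by_cases h : c - b == b - a
      · rw [if_pos h, if_pos h, ih, hT, run, if_pos h]
        ring
      · rw [if_neg h, if_neg h, ih, hT, run, if_neg h]
        ring

lemma alt_eq_T : ∀ (nums : List Int), numberOfArithmeticSlices4_alt nums = T nums := by
  intro nums
  match nums with
  | [] => rfl
  | [_] => rfl
  | a :: b :: rest =>
      show altGo a b rest 0 0 = T (a :: b :: rest)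
      rw [altGo_eq]
      ring

-- ===== VERDICT (by name: the statement is the Claim_ definition above) =====
theorem numberOfArithmeticSlices4_spec : Claim_equal_numberOfArithmeticSlices4 := by
  intro nums _
  show numberOfArithmeticSlices4 nums = numberOfArithmeticSlices4_alt nums
  rw [A_eq_T, alt_eq_T]
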